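-- pv_equiv track=rewrite | github.com/MoChen-bop/Course-Experiments | 2019 Autumn：information retrieval/EXP 2：word segment/code/dictionary_based/dictionary_based_segmenter.py | get_max_match_route
-- ===== SOURCE A (Python) =====
-- def get_max_match_route(DAG):
--     route = {}
--     i = 0
--     for i in range(len(DAG)):
--         if DAG[i] != []:
--             route[i] = max(DAG[i])
--         else:
--             j = i
--             while j < len(DAG) and DAG[j] == [] :
--                 j += 1
--             route[i] = j
--     return route
-- ===== SOURCE B (Python) =====
-- def get_max_match_route(DAG):
--     # single backward pass: track the nearest non-empty index to the right
--     n = len(DAG)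
--     vals = [0] * n
--     nxt = n
--     for i in range(n - 1, -1, -1):
--         if DAG[i]:
--             nxt = i
--             vals[i] = max(DAG[i])
--         else:
--             vals[i] = nxt
--     return {i: v for i, v in zip(range(n), vals)}
-- ===== Notes on version B (the rewrite author's own statement) =====
-- stated objective: alternative
-- what changed: Replaces A's forward loop with an inner forward rescan over runs of empty entries by a single backward pass that tracks the nearest non-empty index to the right (A is quadratic only on long empty runs, so random inputs show the same cost).
import Mathlib
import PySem

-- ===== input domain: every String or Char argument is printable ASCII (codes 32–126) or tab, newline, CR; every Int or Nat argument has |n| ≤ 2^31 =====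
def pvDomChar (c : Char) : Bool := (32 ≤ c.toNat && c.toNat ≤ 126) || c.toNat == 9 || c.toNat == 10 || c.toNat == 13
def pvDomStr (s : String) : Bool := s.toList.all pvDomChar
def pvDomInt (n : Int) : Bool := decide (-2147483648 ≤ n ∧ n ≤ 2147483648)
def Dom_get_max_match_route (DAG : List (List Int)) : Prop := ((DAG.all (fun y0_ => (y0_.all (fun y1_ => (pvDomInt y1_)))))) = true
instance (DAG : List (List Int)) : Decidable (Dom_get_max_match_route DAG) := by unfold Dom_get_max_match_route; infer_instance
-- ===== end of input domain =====

-- B is a single backward pass tracking the nearest non-empty index to the right; A rescans forward inside the loop.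

-- ===== PORT A =====
-- max(l) for nonempty l (A only calls it on nonempty lists)
def pyMaxI (l : List Int) : Int := (PySem.List.max? l (fun x => x)).getD 0

-- inner 'while j < len(DAG) and DAG[j] == []' loop of A
def findNextA (DAG : List (List Int)) (j : Nat) : Nat :=
  if h : j < DAG.length ∧ DAG.getD j [] = [] then findNextA DAG (j + 1) else j
termination_by DAG.length - j
decreasing_by omega

def get_max_match_route (DAG : List (List Int)) : List (Int × Int) :=
  ((List.range DAG.length).foldl (fun route i =>
      if DAG.getD i [] ≠ [] then
        route.insert (i : Int) (pyMaxI (DAG.getD i []))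
      else
        route.insert (i : Int) ((findNextA DAG i : Int)))
    PySem.Dict.empty).items

-- ===== PORT B =====
-- backward pass over the list: returns (nearest non-empty absolute index ≥ i, values for indices i..n-1)
def bpass : Nat → List (List Int) → Int × List Int
  | i, [] => ((i : Int), [])
  | i, l :: ls =>
    let r := bpass (i + 1) ls
    if l = [] then (r.1, r.1 :: r.2)
    else ((i : Int), pyMaxI l :: r.2)

def get_max_match_route_alt (DAG : List (List Int)) : List (Int × Int) :=
  ((List.range DAG.length).zip (bpass 0 DAG).2).map (fun p => ((p.1 : Int), p.2))

-- ===== PRECONDITION & SPEC =====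
def Spec_get_max_match_route (DAG : List (List Int)) (out : List (Int × Int)) : Prop := out = get_max_match_route_alt DAG
instance (DAG : List (List Int)) (out : List (Int × Int)) : Decidable (Spec_get_max_match_route DAG out) := by unfold Spec_get_max_match_route; infer_instance

-- ===== CLAIM (what is proved, stated in full; the proofs are below) =====
def Claim_equal_get_max_match_route : Prop := ∀ (DAG : List (List Int)), Dom_get_max_match_route DAG → Spec_get_max_match_route DAG (get_max_match_route DAG)

-- ===== LEMMAS AND PROOFS =====

-- the common value at index i
def pvVal (DAG : List (List Int)) (i : Nat) : Int :=
  if DAG.getD i [] ≠ [] then pyMaxI (DAG.getD i []) else (findNextA DAG i : Int)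

theorem getA_eq (DAG : List (List Int)) :
    get_max_match_route DAG = (List.range DAG.length).map (fun (i : Nat) => ((i : Int), pvVal DAG i)) := by
  unfold get_max_match_route
  have hfn : (fun (route : PySem.Dict Int Int) (i : Nat) =>
      if DAG.getD i [] ≠ [] then
        route.insert (i : Int) (pyMaxI (DAG.getD i []))
      else
        route.insert (i : Int) ((findNextA DAG i : Int)))
      = fun route i => route.insert ((i : Nat) : Int) (pvVal DAG i) := by
    funext route i
    unfold pvVal
    split <;> rfl
  rw [hfn]
  rw [PySem.Dict.items_foldl_insert_fresh (k := fun i : Nat => (i : Int))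
        (v := fun i => pvVal DAG i)]
  · show PySem.Dict.empty.items ++ _ = _
    rw [show PySem.Dict.empty.items = ([] : List (Int × Int)) from rfl, List.nil_append]
  · intro a _; simp [PySem.Dict.contains_empty]
  · exact (List.nodup_range).map (fun a b h => by exact_mod_cast h)

theorem drop_getD (DAG : List (List Int)) (i : Nat) (l : List Int) (ls : List (List Int))
    (h : DAG.drop i = l :: ls) : DAG.getD i [] = l := by
  have h0 : DAG[i]? = some l := by
    have hh := List.getElem?_drop (xs := DAG) (i := i) (j := 0)
    rw [h] at hh; simpa using hh.symm
  simp [List.getD, h0]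

theorem bpass_spec (DAG : List (List Int)) : ∀ (ls : List (List Int)) (i : Nat),
    DAG.drop i = ls →
    (bpass i ls).1 = ((findNextA DAG i : Nat) : Int) ∧
    (bpass i ls).2 = (List.range ls.length).map (fun k => pvVal DAG (i + k)) := by
  intro ls
  induction ls with
  | nil =>
    intro i h
    have hi : DAG.length ≤ i := by
      by_contra hn
      have := List.drop_eq_nil_iff.mp h
      omega
    have hfa : findNextA DAG i = i := by
      rw [findNextA, dif_neg (show ¬(i < DAG.length ∧ DAG.getD i [] = []) from by omega)]
    constructor
    · simp only [bpass, hfa]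
    · simp [bpass]
  | cons l ls ih =>
    intro i h
    have hi : i < DAG.length := by
      by_contra hn
      rw [List.drop_eq_nil_of_le (by omega)] at h
      simp at h
    have hgd : DAG.getD i [] = l := drop_getD DAG i l ls h
    have hdrop : DAG.drop (i + 1) = ls := by
      have ht : DAG.drop (i + 1) = (DAG.drop i).tail := by rw [List.tail_drop]
      rw [ht, h]; rfl
    have ihs := ih (i + 1) hdrop
    have htail : (List.range (l :: ls).length).map (fun k => pvVal DAG (i + k))
        = pvVal DAG i :: (List.range ls.length).map (fun k => pvVal DAG (i + 1 + k)) := by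
      simp only [List.length_cons, List.range_succ_eq_map, List.map_cons, List.map_map]
      refine congrArg₂ _ (by rw [Nat.add_zero]) ?_
      apply List.map_congr_left
      intro k _
      simp only [Function.comp]
      congr 1
      omega
    by_cases hl : l = []
    · have hfa : findNextA DAG i = findNextA DAG (i + 1) := by
        rw [findNextA, dif_pos ⟨hi, by rw [hgd, hl]⟩]
      have hb : bpass i (l :: ls)
          = ((bpass (i + 1) ls).1, (bpass (i + 1) ls).1 :: (bpass (i + 1) ls).2) := by
        simp [bpass, hl]
      have hv : pvVal DAG i = ((findNextA DAG i : Nat) : Int) := by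
        unfold pvVal
        rw [hgd, hl]
        simp
      refine ⟨?_, ?_⟩
      · rw [hb, ihs.1, hfa]
      · rw [hb]
        show (bpass (i + 1) ls).1 :: (bpass (i + 1) ls).2 = _
        rw [htail, hv, hfa, ihs.1, ihs.2]
    · have hfa : findNextA DAG i = i := by
        rw [findNextA, dif_neg (fun hc => hl (by rw [← hgd]; exact hc.2))]
      have hb : bpass i (l :: ls) = ((i : Int), pyMaxI l :: (bpass (i + 1) ls).2) := by
        simp [bpass, hl]
      have hv : pvVal DAG i = pyMaxI l := by
        unfold pvVal
        rw [hgd, if_pos hl]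
      refine ⟨?_, ?_⟩
      · rw [hb, hfa]
      · rw [hb]
        show pyMaxI l :: (bpass (i + 1) ls).2 = _
        rw [htail, hv, ihs.2]

theorem getB_eq (DAG : List (List Int)) :
    get_max_match_route_alt DAG = (List.range DAG.length).map (fun (i : Nat) => ((i : Int), pvVal DAG i)) := by
  unfold get_max_match_route_alt
  have h := (bpass_spec DAG DAG 0 (by simp)).2
  rw [h]
  rw [show (List.range DAG.length).map (fun k => pvVal DAG (0 + k))
        = (List.range DAG.length).map (fun k => pvVal DAG k) by simp]
  have hz := List.zip_map' (f := id) (g := fun k => pvVal DAG k) (l := List.range DAG.length)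
  simp only [List.map_id] at hz
  rw [hz]
  simp [List.map_map, Function.comp]

-- ===== VERDICT (by name: the statement is the Claim_ definition above) =====
theorem get_max_match_route_spec : Claim_equal_get_max_match_route := by
  intro DAG _
  unfold Spec_get_max_match_route
  rw [getA_eq, getB_eq]
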